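-- pv_equiv track=rewrite | github.com/Romain1099/BFtools | QFGen/main.py | add_percent_inside_document
-- ===== SOURCE A (Python) =====
-- def add_percent_inside_document(latex_content: str) -> str:
--     """
--     Ajoute un '%' à la fin de chaque ligne non vide et aux lignes vides
--     uniquement à l'intérieur de l'environnement \\begin{document} et \\end{document}.
--     """
--     inside_document = False
--     cleaned_lines = []
--
--     for line in latex_content.splitlines():
--         stripped_line = line.rstrip()
--
--         if r'\begin{document}' in stripped_line:
--             inside_document = True
--             cleaned_lines.append(stripped_line)
--             continue
--
--         if r'\end{document}' in stripped_line:
--             inside_document = False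
--             cleaned_lines.append(stripped_line)
--             continue
--
--         if inside_document:
--             if stripped_line:  # Ligne non vide
--                 if not stripped_line.endswith('%'):
--                     cleaned_lines.append(stripped_line + ' %')
--                 else:
--                     cleaned_lines.append(stripped_line)
--             else:  # Ligne vide, ajouter un '%'
--                 cleaned_lines.append('%')
--         else:
--             cleaned_lines.append(stripped_line)
--
--     return '\n'.join(cleaned_lines)
-- ===== SOURCE B (Python) =====
-- def add_percent_inside_document(latex_content: str) -> str:
--     """Two-pass rewrite: first compute a per-line inside-document flag list,
--     then render each (stripped line, flag) pair independently."""
--     stripped = [line.rstrip() for line in latex_content.splitlines()]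
--
--     flags = []
--     inside = False
--     for s in stripped:
--         if '\\begin{document}' in s:
--             inside = True
--             flags.append(False)
--         elif '\\end{document}' in s:
--             inside = False
--             flags.append(False)
--         else:
--             flags.append(inside)
--
--     def render(s, f):
--         if not f:
--             return s
--         if not s:
--             return '%'
--         return s if s.endswith('%') else s + ' %'
--
--     return '\n'.join(render(s, f) for s, f in zip(stripped, flags))
-- ===== Notes on version B (the rewrite author's own statement) =====
-- stated objective: alternative
-- what changed: Replaces the single stateful loop that both toggles the flag and builds the output with two independent passes: one pass computes a per-line inside-document flag list, then a stateless map renders each (stripped line, flag) pair and joins.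
import Mathlib
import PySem

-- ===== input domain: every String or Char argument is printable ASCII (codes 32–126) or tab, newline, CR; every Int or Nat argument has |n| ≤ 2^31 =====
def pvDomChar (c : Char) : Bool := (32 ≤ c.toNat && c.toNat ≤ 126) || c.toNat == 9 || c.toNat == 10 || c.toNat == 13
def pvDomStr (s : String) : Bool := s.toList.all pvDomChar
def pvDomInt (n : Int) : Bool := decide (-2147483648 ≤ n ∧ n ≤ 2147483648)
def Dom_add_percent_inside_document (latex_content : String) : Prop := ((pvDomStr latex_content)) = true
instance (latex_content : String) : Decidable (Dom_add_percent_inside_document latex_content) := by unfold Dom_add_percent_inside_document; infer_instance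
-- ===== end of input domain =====

-- B differs from A by decomposition: A interleaves the inside-document toggle with output
-- construction in one stateful loop; B first computes a per-line flag list, then renders
-- each (stripped line, flag) pair independently (objective: alternative, same cost).

-- ===== PORT A =====
-- one iteration of A's for-loop: state = (inside_document, cleaned_lines)
def pvStepA (st : Bool × List String) (line : String) : Bool × List String :=
  let s := PySem.Str.rstrip line
  if PySem.Str.isIn "\\begin{document}" s then (true, st.2 ++ [s])
  else if PySem.Str.isIn "\\end{document}" s then (false, st.2 ++ [s])
  else if st.1 then
    if s ≠ "" then
      if ¬ (PySem.Str.endswith s "%") then (st.1, st.2 ++ [s ++ " %"])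
      else (st.1, st.2 ++ [s])
    else (st.1, st.2 ++ ["%"])
  else (st.1, st.2 ++ [s])

def add_percent_inside_document (latex_content : String) : String :=
  PySem.Str.join "\n" ((PySem.Str.splitlines latex_content).foldl pvStepA (false, [])).2

-- ===== PORT B =====
-- first pass: the inside-document flag that applies to each (already stripped) line
def pvFlags : Bool → List String → List Bool
  | _, [] => []
  | inside, s :: rest =>
    if PySem.Str.isIn "\\begin{document}" s then false :: pvFlags true rest
    else if PySem.Str.isIn "\\end{document}" s then false :: pvFlags false rest
    else inside :: pvFlags inside rest

-- second pass: render one (stripped line, flag) pair, independent of neighbours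
def pvRender (s : String) (f : Bool) : String :=
  if ¬ f then s
  else if s = "" then "%"
  else if PySem.Str.endswith s "%" then s
  else s ++ " %"

def add_percent_inside_document_alt (latex_content : String) : String :=
  let stripped := (PySem.Str.splitlines latex_content).map PySem.Str.rstrip
  PySem.Str.join "\n" ((stripped.zip (pvFlags false stripped)).map (fun p => pvRender p.1 p.2))

-- ===== PRECONDITION & SPEC =====
def Spec_add_percent_inside_document (latex_content : String) (out : String) : Prop := out = add_percent_inside_document_alt latex_content
instance (latex_content : String) (out : String) : Decidable (Spec_add_percent_inside_document latex_content out) := by unfold Spec_add_percent_inside_document; infer_instance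

-- ===== CLAIM (what is proved, stated in full; the proofs are below) =====
def Claim_equal_add_percent_inside_document : Prop := ∀ (latex_content : String), Dom_add_percent_inside_document latex_content → Spec_add_percent_inside_document latex_content (add_percent_inside_document latex_content)

-- ===== LEMMAS AND PROOFS =====

-- loop invariant: A's fold from (inside, acc) produces acc followed by B's rendering
-- of the stripped lines under the flags computed from the same toggle state
theorem pv_key (lines : List String) :
    ∀ (inside : Bool) (acc : List String),
      (lines.foldl pvStepA (inside, acc)).2 =
        acc ++ (((lines.map PySem.Str.rstrip).zip
                  (pvFlags inside (lines.map PySem.Str.rstrip))).map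
                    (fun p => pvRender p.1 p.2)) := by
  induction lines with
  | nil => intro inside acc; simp
  | cons l rest ih =>
    intro inside acc
    simp only [List.foldl_cons, List.map_cons, pvStepA, pvFlags]
    split_ifs <;> simp_all [pvRender]

-- ===== VERDICT (by name: the statement is the Claim_ definition above) =====
theorem add_percent_inside_document_spec : Claim_equal_add_percent_inside_document := by
  intro latex_content _
  unfold Spec_add_percent_inside_document add_percent_inside_document add_percent_inside_document_alt
  rw [pv_key]
  simp
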